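-- pv_equiv track=rewrite | github.com/dongyeon94/Algorithym | programmers/python/17676.py | convert
-- ===== SOURCE A (Python) =====
-- def convert(arr1,k):
--     get= []
--     for i in range(len(arr1)):
--         m = bin(arr1[i])[2:]
--         n = '0'*(k - len(m))+ m
--         arr1_1 =''
--         for j in n:
--             if j=='1':
--                 arr1_1 += '#'
--             else:
--                 arr1_1 += ' '
--         get.append(arr1_1)
--     return get
-- ===== SOURCE B (Python) =====
-- def convert(arr1, k):
--     # Recursive halving builds each bit string most-significant-first; rjust pads with
--     # spaces (what A's k-wide '0'-padding becomes after its '0'->' ' remap).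
--     def render(n):
--         if n < 2:
--             return '#' if n & 1 else ' '
--         return render(n >> 1) + ('#' if n & 1 else ' ')
--     return [render(n).rjust(k) for n in arr1]
-- ===== Notes on version B (the rewrite author's own statement) =====
-- stated objective: alternative
-- what changed: B renders each number by structural recursion on the number itself (halve, recurse, append '#'/' ' for the low bit) and pads with str.rjust, replacing A's bin()-string slicing, manual '0'-padding and character-remapping loop.
-- outside the precondition, e.g. on convert([-5], 5): A returns ['  # #'], B returns ['    #']
import Mathlib
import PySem

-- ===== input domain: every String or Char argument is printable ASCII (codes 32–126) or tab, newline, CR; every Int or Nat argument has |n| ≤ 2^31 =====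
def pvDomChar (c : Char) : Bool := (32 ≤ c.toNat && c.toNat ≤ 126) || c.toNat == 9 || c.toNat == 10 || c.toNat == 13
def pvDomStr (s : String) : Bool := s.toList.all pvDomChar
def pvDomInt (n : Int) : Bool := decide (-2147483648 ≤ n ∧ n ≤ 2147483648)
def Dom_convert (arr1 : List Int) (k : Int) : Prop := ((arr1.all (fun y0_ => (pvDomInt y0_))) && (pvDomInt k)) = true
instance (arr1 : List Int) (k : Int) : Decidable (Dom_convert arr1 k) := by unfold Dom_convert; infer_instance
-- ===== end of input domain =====

-- B renders each number by structural recursion on the number (halve, recurse, append a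
-- bit char) and pads with rjust, replacing A's bin()-slicing and remapping loop (alternative).

-- ===== PORT A =====
def convert (arr1 : List Int) (k : Int) : List String :=
  arr1.foldl (fun get a =>
    let m := PySem.List.slice (PySem.Int.toBinChars0b a) (some 2) none   -- bin(a)[2:]
    let n := List.replicate (k - (m.length : Int)).toNat '0' ++ m       -- '0'*(k-len(m)) + m
    let s := n.foldl (fun acc j => acc ++ [if j = '1' then '#' else ' ']) ([] : List Char)
    get ++ [String.mk s]) []

-- ===== PORT B =====
-- render(n): recursive halving, most-significant bit first (strings as List Char).
def renderB (n : Int) : List Char :=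
  if n < 2 then (if PySem.Int.band n 1 ≠ 0 then ['#'] else [' '])
  else renderB (n >>> (1 : Nat)) ++ (if PySem.Int.band n 1 ≠ 0 then ['#'] else [' '])
  termination_by n.toNat
  decreasing_by
    rename_i h
    obtain ⟨m, rfl⟩ := Int.eq_ofNat_of_zero_le (by omega : (0:Int) ≤ n)
    have hsh : ((m : Int) >>> (1 : Nat)) = ((m >>> 1 : Nat) : Int) := by simp
    have hdiv : m >>> 1 = m / 2 := by simp [Nat.shiftRight_succ, Nat.shiftRight_zero]
    rw [hsh, hdiv]
    simp only [Int.toNat_natCast]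
    omega

-- .rjust(k) ported exactly: left-pad with ' ' up to length k (no pad when k ≤ len).
def convert_alt (arr1 : List Int) (k : Int) : List String :=
  arr1.map (fun n =>
    String.mk (List.replicate (k - ((renderB n).length : Int)).toNat ' ' ++ renderB n))

-- ===== PRECONDITION & SPEC =====
-- Pre_ excludes lists containing a negative number: there bin(a)[2:] is 'b…' (the '-'
-- dropped, the 'b' kept and rendered as a blank), an accident of A's string slicing
-- which B's recursive rendering does not reproduce.
def Pre_convert (arr1 : List Int) (k : Int) : Prop := ∀ a ∈ arr1, 0 ≤ a
instance (arr1 : List Int) (k : Int) : Decidable (Pre_convert arr1 k) := by unfold Pre_convert; infer_instance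

def pvWitness_convert : List Int × Int := ([0, 5, 100], 8)

def Spec_convert (arr1 : List Int) (k : Int) (out : List String) : Prop := out = convert_alt arr1 k
instance (arr1 : List Int) (k : Int) (out : List String) : Decidable (Spec_convert arr1 k out) := by unfold Spec_convert; infer_instance

-- ===== CLAIM (what is proved, stated in full; the proofs are below) =====
def Claim_equal_convert : Prop := ∀ (arr1 : List Int) (k : Int), Dom_convert arr1 k → Pre_convert arr1 k → Spec_convert arr1 k (convert arr1 k)

-- ===== LEMMAS AND PROOFS =====

-- binary digits of a natural number, most significant first (what bin() prints after "0b")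
def bitsA (n : Nat) : List Char :=
  if h : n < 2 then [Nat.digitChar n]
  else bitsA (n / 2) ++ [Nat.digitChar (n % 2)]
  termination_by n
  decreasing_by exact Nat.div_lt_self (by omega) (by omega)

theorem toDigitsCore_two_eq (f : Nat) : ∀ (n : Nat) (rest : List Char), n < f →
    Nat.toDigitsCore 2 f n rest = bitsA n ++ rest := by
  induction f with
  | zero => intro n rest h; omega
  | succ f ih =>
    intro n rest h
    rw [Nat.toDigitsCore]
    by_cases h2 : n / 2 = 0
    · have hn2 : n < 2 := by omega
      rw [if_pos h2, bitsA, dif_pos hn2, Nat.mod_eq_of_lt hn2]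
      simp
    · have hlt : n / 2 < f := by omega
      rw [if_neg h2, ih (n / 2) _ hlt]
      conv_rhs => rw [bitsA, dif_neg (show ¬ n < 2 by omega)]
      simp

theorem toDigits_two_eq (n : Nat) : Nat.toDigits 2 n = bitsA n := by
  rw [Nat.toDigits, toDigitsCore_two_eq (n + 1) n [] (by omega)]
  simp

-- B's render on a natural number is exactly A's remapped digit list
theorem renderB_eq_map (m : Nat) :
    renderB (m : Int) = (bitsA m).map (fun j => if j = '1' then '#' else ' ') := by
  induction m using Nat.strong_induction_on with
  | _ m ih =>
    by_cases h : m < 2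
    · interval_cases m <;> · rw [renderB, bitsA]; decide
    · rw [renderB, if_neg (by exact_mod_cast h), bitsA, dif_neg h]
      have hsh : ((m : Int) >>> (1 : Nat)) = ((m >>> 1 : Nat) : Int) := by simp
      have hdiv : m >>> 1 = m / 2 := by
        simp [Nat.shiftRight_succ, Nat.shiftRight_zero]
      rw [hsh, hdiv, ih (m / 2) (Nat.div_lt_self (by omega) (by omega)), List.map_append]
      congr 1
      have hb : PySem.Int.band (m : Int) 1 = ((m &&& 1 : Nat) : Int) := by
        exact_mod_cast PySem.Int.band_natCast m 1
      rw [hb, Nat.and_one_is_mod]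
      rcases Nat.mod_two_eq_zero_or_one m with h2 | h2 <;> rw [h2] <;> decide

-- core: A's padded-and-remapped digit string equals B's rjust-padded render, per element
theorem perElem_eq (a : Int) (k : Int) (ha : 0 ≤ a) :
    (List.replicate
        (k - ((PySem.List.slice (PySem.Int.toBinChars0b a) (some 2) none).length : Int)).toNat '0' ++
        PySem.List.slice (PySem.Int.toBinChars0b a) (some 2) none).foldl
      (fun acc j => acc ++ [if j = '1' then '#' else ' ']) ([] : List Char)
    = List.replicate (k - ((renderB a).length : Int)).toNat ' ' ++ renderB a := by
  obtain ⟨m, rfl⟩ := Int.eq_ofNat_of_zero_le ha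
  have hbin : PySem.List.slice (PySem.Int.toBinChars0b (m : Int)) (some 2) none = bitsA m := by
    have h0 : PySem.Int.toBinChars0b (m : Int) = '0' :: 'b' :: Nat.toDigits 2 m := by
      simp [PySem.Int.toBinChars0b, Int.not_lt.mpr (by positivity : (0:Int) ≤ (m:Int))]
    rw [h0, show ((2:Int)) = ((2:Nat):Int) from rfl, PySem.List.slice_from_natCast]
    simp [toDigits_two_eq]
  rw [hbin, PySem.List.foldl_append_singleton_eq_map, List.nil_append, List.map_append,
    List.map_replicate, renderB_eq_map]
  have h0 : (if ('0' : Char) = '1' then '#' else ' ') = ' ' := by decide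
  rw [h0, List.length_map]

-- ===== VERDICT (by name: the statement is the Claim_ definition above) =====
theorem convert_spec : Claim_equal_convert := by
  intro arr1 k _ hpre
  unfold Spec_convert convert convert_alt
  rw [PySem.List.foldl_append_singleton_eq_map, List.nil_append]
  apply List.map_congr_left
  intro a ha
  exact congrArg String.mk (perElem_eq a k (hpre a ha))
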